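-- pv_equiv track=rewrite | github.com/karen-alber11/property_sale_app | Fall 22/Machine Learning/FaceAndDigitClassification/FaceAndDigitClassification/Environmental_Variables.py | Symmetrical
-- ===== SOURCE A (Python) =====
-- def Horizontal_Image_Bounds(img):
--     leftMost = 1000
--     rightMost = 0
--     j = 0
--     for line in img:
--         for char in line:
--             if(char == "#" or char == "+"):
--                 if(j > rightMost):
--                     rightMost = j
--                 if(j < leftMost):
--                     leftMost = j
--             j += 1
--         j = 0
--     return int((leftMost + rightMost) / 2)
--
-- def Symmetrical(mtrx, img_no):
--     left = 0
--     right = 0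
--     middleIndex = Horizontal_Image_Bounds(mtrx[img_no])
--     j = 0
--     for line in mtrx[img_no]:
--         for char in line:
--             if(j <= middleIndex and (char == "#" or char == "+")):
--                 left += 1
--             elif(j > middleIndex and (char == "#" or char == "+")):
--                 right += 1
--             j += 1
--         j = 0
--
--     if(abs(right - left) <= 50):
--         return 1
--     else:
--         return 0
-- ===== SOURCE B (Python) =====
-- def Symmetrical(mtrx, img_no):
--     hist = {}
--     for line in mtrx[img_no]:
--         for j, ch in enumerate(line):
--             if ch == "#" or ch == "+":
--                 hist[j] = hist.get(j, 0) + 1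
--     mid = (min([1000, *hist]) + max([0, *hist])) // 2
--     balance = sum(c if j <= mid else -c for j, c in hist.items())
--     return 1 if abs(balance) <= 50 else 0
-- ===== Notes on version B (the rewrite author's own statement) =====
-- stated objective: simpler
-- what changed: B scans the image once, tallying marks per within-line column into a dict histogram, then gets the midpoint from min/max over the seeded key list and decides symmetry with a single signed sum over the histogram items (+count for columns <= mid, -count beyond), instead of A's two separate nested scans of the whole image with running bound and left/right counters.
import Mathlib
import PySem

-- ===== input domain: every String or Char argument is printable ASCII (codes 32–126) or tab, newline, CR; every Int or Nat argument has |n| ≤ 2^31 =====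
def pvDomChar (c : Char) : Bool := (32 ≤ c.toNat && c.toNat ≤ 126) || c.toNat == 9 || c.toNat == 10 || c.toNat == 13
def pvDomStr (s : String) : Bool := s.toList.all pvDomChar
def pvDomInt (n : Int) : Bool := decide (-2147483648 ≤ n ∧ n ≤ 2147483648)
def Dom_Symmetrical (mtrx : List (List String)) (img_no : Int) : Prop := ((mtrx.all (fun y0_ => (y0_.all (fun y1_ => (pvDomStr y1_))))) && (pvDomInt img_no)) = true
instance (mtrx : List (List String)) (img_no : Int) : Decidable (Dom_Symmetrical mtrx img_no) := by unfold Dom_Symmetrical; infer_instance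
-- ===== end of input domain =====

-- B replaces A's two nested scans of the image by ONE scan that tallies marks per column
-- into a dict (histogram); min/max of the seeded key list give the midpoint and one signed
-- sum over the histogram items decides symmetry: simpler. Return-value equivalence on valid
-- image indices (A raises IndexError otherwise).

-- ===== PORT A =====
-- state: (leftMost, rightMost, j)
def pvBoundCharA (st : Int × Int × Int) (c : Char) : Int × Int × Int :=
  if c = '#' ∨ c = '+' then
    ((if st.2.2 < st.1 then st.2.2 else st.1),
     (if st.2.2 > st.2.1 then st.2.2 else st.2.1),
     st.2.2 + 1)
  else (st.1, st.2.1, st.2.2 + 1)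

def pvBoundLineA (st : Int × Int × Int) (line : String) : Int × Int × Int :=
  let st2 := line.toList.foldl pvBoundCharA st
  (st2.1, st2.2.1, 0)   -- j = 0 after each line

def Horizontal_Image_Bounds (img : List String) : Int :=
  let s := img.foldl pvBoundLineA (1000, 0, 0)
  PySem.Int.floordiv (s.1 + s.2.1) 2   -- int((l+r)/2); l+r ≥ 0 always, so floor = Python's int()

-- state: (left, right, j)
def pvCountCharA (mid : Int) (st : Int × Int × Int) (c : Char) : Int × Int × Int :=
  if st.2.2 ≤ mid ∧ (c = '#' ∨ c = '+') then (st.1 + 1, st.2.1, st.2.2 + 1)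
  else if st.2.2 > mid ∧ (c = '#' ∨ c = '+') then (st.1, st.2.1 + 1, st.2.2 + 1)
  else (st.1, st.2.1, st.2.2 + 1)

def pvCountLineA (mid : Int) (st : Int × Int × Int) (line : String) : Int × Int × Int :=
  let st2 := line.toList.foldl (pvCountCharA mid) st
  (st2.1, st2.2.1, 0)

def Symmetrical (mtrx : List (List String)) (img_no : Int) : Int :=
  let img := (PySem.List.pyGet? mtrx img_no).getD []   -- mtrx[img_no]; Pre_ excludes the IndexError case
  let middleIndex := Horizontal_Image_Bounds img
  let s := img.foldl (pvCountLineA middleIndex) (0, 0, 0)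
  if (s.2.1 - s.1).natAbs ≤ 50 then 1 else 0

-- ===== PORT B =====
-- hist[j] = hist.get(j, 0) + 1 for each mark at within-line column j
def pvHistB (img : List String) : PySem.Dict Int Int :=
  img.foldl (fun d line =>
      (PySem.List.enumerate line.toList).foldl
        (fun d p => if p.2 = '#' ∨ p.2 = '+' then d.insert p.1 (d.getD p.1 0 + 1) else d) d)
    PySem.Dict.empty

def Symmetrical_alt (mtrx : List (List String)) (img_no : Int) : Int :=
  let img := (PySem.List.pyGet? mtrx img_no).getD []
  let hist := pvHistB img
  let lo : Int := (PySem.List.min? ((1000 : Int) :: hist.keys) (fun x => x)).getD 1000  -- min([1000, *hist])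
  let hi : Int := (PySem.List.max? ((0 : Int) :: hist.keys) (fun x => x)).getD 0        -- max([0, *hist])
  let mid := PySem.Int.floordiv (lo + hi) 2
  let balance : Int := (hist.items.map (fun p => if p.1 ≤ mid then p.2 else -p.2)).sum
  if balance.natAbs ≤ 50 then 1 else 0

-- ===== PRECONDITION & SPEC =====
-- Pre_: img_no is a valid (possibly negative, Python-style) index into mtrx; A raises IndexError otherwise.
def Pre_Symmetrical (mtrx : List (List String)) (img_no : Int) : Prop :=
  PySem.Raise.InRange mtrx.length img_no
instance (mtrx : List (List String)) (img_no : Int) : Decidable (Pre_Symmetrical mtrx img_no) := by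
  unfold Pre_Symmetrical; infer_instance

def pvWitness_Symmetrical : List (List String) × Int := ([["#+.", ".#"]], 0)

def Spec_Symmetrical (mtrx : List (List String)) (img_no : Int) (out : Int) : Prop := out = Symmetrical_alt mtrx img_no
instance (mtrx : List (List String)) (img_no : Int) (out : Int) : Decidable (Spec_Symmetrical mtrx img_no out) := by unfold Spec_Symmetrical; infer_instance

-- ===== CLAIM (what is proved, stated in full; the proofs are below) =====
def Claim_equal_Symmetrical : Prop := ∀ (mtrx : List (List String)) (img_no : Int), Dom_Symmetrical mtrx img_no → Pre_Symmetrical mtrx img_no → Spec_Symmetrical mtrx img_no (Symmetrical mtrx img_no)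

-- ===== LEMMAS AND PROOFS =====

-- canonical list of mark columns of one line, starting at column j
def pvMk (j : Int) : List Char → List Int
  | [] => []
  | c :: cs => if c = '#' ∨ c = '+' then j :: pvMk (j + 1) cs else pvMk (j + 1) cs

def pvCols (img : List String) : List Int := img.flatMap (fun line => pvMk 0 line.toList)

-- A's bounds pass, one line
theorem pvBoundChar_foldl (cs : List Char) : ∀ (l r j : Int),
    cs.foldl pvBoundCharA (l, r, j) =
      ((pvMk j cs).foldl (fun a b => if b < a then b else a) l,
       (pvMk j cs).foldl (fun a b => if b > a then b else a) r,
       j + cs.length) := by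
  induction cs with
  | nil => intro l r j; simp [pvMk]
  | cons c cs ih =>
    intro l r j
    by_cases h : c = '#' ∨ c = '+' <;>
      simp [pvBoundCharA, pvMk, h, ih] <;> omega

-- A's bounds pass, whole image, against the flattened column list
theorem pvBoundLine_foldl (img : List String) : ∀ (l r : Int),
    img.foldl pvBoundLineA (l, r, 0) =
      ((pvCols img).foldl (fun a b => if b < a then b else a) l,
       (pvCols img).foldl (fun a b => if b > a then b else a) r, 0) := by
  induction img with
  | nil => intro l r; simp [pvCols]
  | cons line img ih =>
    intro l r
    simp only [List.foldl_cons, pvCols, List.flatMap_cons, List.foldl_append]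
    rw [show pvBoundLineA (l, r, 0) line =
        ((pvMk 0 line.toList).foldl (fun a b => if b < a then b else a) l,
         (pvMk 0 line.toList).foldl (fun a b => if b > a then b else a) r, 0) by
      simp [pvBoundLineA, pvBoundChar_foldl]]
    exact ih _ _

-- A's counting pass, one line
theorem pvCountChar_foldl (mid : Int) (cs : List Char) : ∀ (L R j : Int),
    cs.foldl (pvCountCharA mid) (L, R, j) =
      (L + ((pvMk j cs).countP (fun x => x ≤ mid) : Int),
       R + ((pvMk j cs).countP (fun x => mid < x) : Int),
       j + cs.length) := by
  induction cs with
  | nil => intro L R j; simp [pvMk]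
  | cons c cs ih =>
    intro L R j
    by_cases h : c = '#' ∨ c = '+'
    · by_cases hj : j ≤ mid
      · have hj' : ¬ mid < j := by omega
        simp [pvCountCharA, pvMk, h, hj, hj', ih]
        constructor <;> omega
      · have hj' : mid < j := by omega
        simp [pvCountCharA, pvMk, h, hj, hj', ih]
        constructor <;> omega
    · simp [pvCountCharA, pvMk, h, ih]
      omega

-- A's counting pass, whole image
theorem pvCountLine_foldl (mid : Int) (img : List String) : ∀ (L R : Int),
    img.foldl (pvCountLineA mid) (L, R, 0) =
      (L + ((pvCols img).countP (fun x => x ≤ mid) : Int),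
       R + ((pvCols img).countP (fun x => mid < x) : Int), 0) := by
  induction img with
  | nil => intro L R; simp [pvCols]
  | cons line img ih =>
    intro L R
    simp only [List.foldl_cons, pvCols, List.flatMap_cons]
    rw [show pvCountLineA mid (L, R, 0) line =
        (L + ((pvMk 0 line.toList).countP (fun x => x ≤ mid) : Int),
         R + ((pvMk 0 line.toList).countP (fun x => mid < x) : Int), 0) by
      simp [pvCountLineA, pvCountChar_foldl]]
    rw [ih]
    simp [pvCols, List.countP_append]
    constructor <;> ring

-- B's histogram loop over one line is the counting fold over the line's mark columns
theorem pvHist_line (cs : List Char) : ∀ (j : Int) (d : PySem.Dict Int Int),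
    (PySem.List.enumerate cs j).foldl
        (fun d p => if p.2 = '#' ∨ p.2 = '+' then d.insert p.1 (d.getD p.1 0 + 1) else d) d
      = (pvMk j cs).foldl (fun d x => d.insert x (d.getD x 0 + 1)) d := by
  induction cs with
  | nil => intro j d; simp [PySem.List.enumerate_nil, pvMk]
  | cons c cs ih =>
    intro j d
    by_cases h : c = '#' ∨ c = '+' <;>
      simp [PySem.List.enumerate_cons, pvMk, h, ih]

-- B's histogram is Counter(pvCols img)
theorem pvHist_eq_counter (img : List String) : pvHistB img = PySem.Dict.counter (pvCols img) := by
  rw [← PySem.Dict.foldl_insert_getD_add_one_eq_counter]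
  unfold pvHistB pvCols
  generalize PySem.Dict.empty = d
  induction img generalizing d with
  | nil => simp
  | cons line img ih =>
    simp only [List.foldl_cons, List.flatMap_cons, List.foldl_append]
    rw [pvHist_line]
    exact ih _

-- the if-folds of A are min/max folds
theorem pvIfMin : (fun (a b : Int) => if b < a then b else a) = (fun a b => min a b) := by
  funext a b; rw [min_def]; split_ifs <;> omega
theorem pvIfMax : (fun (a b : Int) => if b > a then b else a) = (fun a b => max a b) := by
  funext a b; rw [max_def]; split_ifs <;> omega

-- folding min/max over a list and over its set of distinct elements agree
theorem pvFoldlMin_set (xs : List Int) (a : Int) :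
    xs.foldl min a = (PySem.Set.ofList xs).foldl min a := by
  apply le_antisymm
  · rcases PySem.List.foldl_min_mem (PySem.Set.ofList xs) a with h | h
    · rw [h]; exact (PySem.List.foldl_min_le xs a).1
    · exact (PySem.List.foldl_min_le xs a).2 _ ((PySem.Set.mem_ofList _ _).1 h)
  · rcases PySem.List.foldl_min_mem xs a with h | h
    · rw [h]; exact (PySem.List.foldl_min_le (PySem.Set.ofList xs) a).1
    · exact (PySem.List.foldl_min_le (PySem.Set.ofList xs) a).2 _ ((PySem.Set.mem_ofList _ _).2 h)

theorem pvFoldlMax_set (xs : List Int) (a : Int) :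
    xs.foldl max a = (PySem.Set.ofList xs).foldl max a := by
  apply le_antisymm
  · rcases PySem.List.foldl_max_mem xs a with h | h
    · rw [h]; exact (PySem.List.le_foldl_max (PySem.Set.ofList xs) a).1
    · exact (PySem.List.le_foldl_max (PySem.Set.ofList xs) a).2 _ ((PySem.Set.mem_ofList _ _).2 h)
  · rcases PySem.List.foldl_max_mem (PySem.Set.ofList xs) a with h | h
    · rw [h]; exact (PySem.List.le_foldl_max xs a).1
    · exact (PySem.List.le_foldl_max xs a).2 _ ((PySem.Set.mem_ofList _ _).1 h)

-- summing (if x = k then w k else 0) over a Nodup list containing x picks out w x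
theorem pvSum_single (w : Int → Int) (x : Int) : ∀ (K : List Int), K.Nodup → x ∈ K →
    (K.map (fun k => if x = k then w k else 0)).sum = w x := by
  intro K
  induction K with
  | nil => intro _ h; simp at h
  | cons k K ih =>
    intro hnd hx
    rcases List.nodup_cons.1 hnd with ⟨hk, hnd'⟩
    by_cases h : x = k
    · subst h
      have : (K.map (fun k' => if x = k' then w k' else 0)).sum = 0 := by
        apply List.sum_eq_zero
        intro y hy
        rcases List.mem_map.1 hy with ⟨z, hz, rfl⟩
        have : x ≠ z := fun e => hk (e ▸ hz)
        simp [this]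
      simp [this]
    · have hx' : x ∈ K := by rcases List.mem_cons.1 hx with e | e; exact absurd e h; exact e
      simp [h, ih hnd' hx']

-- the signed histogram sum over distinct columns equals left − right over all marks
theorem pvSum_signed (mid : Int) (K : List Int) (hnd : K.Nodup) : ∀ (xs : List Int), (∀ x ∈ xs, x ∈ K) →
    (K.map (fun k => if k ≤ mid then (xs.count k : Int) else -(xs.count k : Int))).sum
      = (xs.countP (fun x => x ≤ mid) : Int) - (xs.countP (fun x => mid < x) : Int) := by
  intro xs
  induction xs with
  | nil => intro _; simp
  | cons x xs ih =>
    intro hsub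
    have hx : x ∈ K := hsub x (by simp)
    have hsub' : ∀ y ∈ xs, y ∈ K := fun y hy => hsub y (by simp [hy])
    have hterm : ∀ k : Int,
        (if k ≤ mid then ((x :: xs).count k : Int) else -(((x :: xs).count k : Int)))
          = (if k ≤ mid then (xs.count k : Int) else -(xs.count k : Int))
            + (if x = k then (if k ≤ mid then 1 else -1) else 0) := by
      intro k
      rw [List.count_cons]
      by_cases he : x = k <;> by_cases hle : k ≤ mid <;>
        simp [he, hle] <;> ring
    calc (K.map (fun k => if k ≤ mid then ((x :: xs).count k : Int) else -(((x :: xs).count k : Int)))).sum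
        = (K.map (fun k => (if k ≤ mid then (xs.count k : Int) else -(xs.count k : Int))
            + (if x = k then (if k ≤ mid then 1 else -1) else 0))).sum := by
          congr 1; exact List.map_congr_left (fun k _ => hterm k)
      _ = (K.map (fun k => if k ≤ mid then (xs.count k : Int) else -(xs.count k : Int))).sum
            + (K.map (fun k => if x = k then (if k ≤ mid then 1 else -1) else 0)).sum := by
          rw [← List.sum_map_add]
      _ = ((xs.countP (fun x => x ≤ mid) : Int) - (xs.countP (fun x => mid < x) : Int))
            + (if x ≤ mid then 1 else -1) := by
          rw [ih hsub', pvSum_single (fun k => if k ≤ mid then 1 else -1) x K hnd hx]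
      _ = ((x :: xs).countP (fun x => x ≤ mid) : Int) - ((x :: xs).countP (fun x => mid < x) : Int) := by
          rw [List.countP_cons, List.countP_cons]
          by_cases hle : x ≤ mid
          · have : ¬ mid < x := by omega
            simp [hle, this]; ring
          · have : mid < x := by omega
            simp [hle, this]; ring

-- the whole-image equality
theorem pvMain (img : List String) :
    (let middleIndex := Horizontal_Image_Bounds img
     let s := img.foldl (pvCountLineA middleIndex) (0, 0, 0)
     if (s.2.1 - s.1).natAbs ≤ 50 then (1 : Int) else 0)
  = (let hist := pvHistB img
     let lo : Int := (PySem.List.min? ((1000 : Int) :: hist.keys) (fun x => x)).getD 1000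
     let hi : Int := (PySem.List.max? ((0 : Int) :: hist.keys) (fun x => x)).getD 0
     let mid := PySem.Int.floordiv (lo + hi) 2
     let balance : Int := (hist.items.map (fun p => if p.1 ≤ mid then p.2 else -p.2)).sum
     if balance.natAbs ≤ 50 then (1 : Int) else 0) := by
  simp only [pvHist_eq_counter, PySem.Dict.keys_counter, PySem.List.min?_id_cons,
    PySem.List.max?_id_cons, Option.getD_some, Horizontal_Image_Bounds, pvBoundLine_foldl,
    pvCountLine_foldl, zero_add, pvIfMin, pvIfMax, PySem.Dict.items_counter, List.map_map]
  rw [← pvFoldlMin_set, ← pvFoldlMax_set]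
  set mid := PySem.Int.floordiv
      ((pvCols img).foldl (fun a b => min a b) 1000 +
       (pvCols img).foldl (fun a b => max a b) 0) 2 with hmid
  have hsum := pvSum_signed mid (PySem.Set.ofList (pvCols img)) (PySem.Set.nodup_ofList _)
      (pvCols img) (fun x hx => (PySem.Set.mem_ofList _ _).2 hx)
  have hmap : (PySem.Set.ofList (pvCols img)).map
        ((fun p : Int × Int => if p.1 ≤ mid then p.2 else -p.2) ∘ fun k => (k, ((pvCols img).count k : Int)))
      = (PySem.Set.ofList (pvCols img)).map
        (fun k => if k ≤ mid then ((pvCols img).count k : Int) else -(((pvCols img).count k : Int))) := by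
    exact List.map_congr_left (fun k _ => rfl)
  rw [hmap, hsum]
  have h : (((pvCols img).countP (fun x => mid < x) : Int) - ((pvCols img).countP (fun x => x ≤ mid) : Int)).natAbs
      = (((pvCols img).countP (fun x => x ≤ mid) : Int) - ((pvCols img).countP (fun x => mid < x) : Int)).natAbs := by
    omega
  rw [h]

-- ===== VERDICT (by name: the statement is the Claim_ definition above) =====
theorem Symmetrical_spec : Claim_equal_Symmetrical := by
  intro mtrx img_no _ _
  unfold Spec_Symmetrical
  exact pvMain ((PySem.List.pyGet? mtrx img_no).getD [])
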